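-- pv_equiv track=rewrite | github.com/XingxingHuang/Leetcode_solutions | algorithms/3_Longest_Substring_Without_Repeating_Characters/solution_ver1.py | __longest_non_repeated_prefix
-- ===== SOURCE A (Python) =====
-- def __longest_non_repeated_prefix(s):
--     charset = {}
--     for char in s:
--         if char not in charset:
--             charset[char] = 1
--         else:
--             return len(charset)
--     return len(s)
-- ===== SOURCE B (Python) =====
-- def __longest_non_repeated_prefix(s):
--     # Binary search on the prefix length: "s[:k] has all-distinct characters" is
--     # downward-closed, so the answer is the largest k with len(set(s[:k])) == k.
--     lo, hi = 0, len(s)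
--     while lo < hi:
--         mid = (lo + hi + 1) // 2
--         if len(set(s[:mid])) == mid:
--             lo = mid
--         else:
--             hi = mid - 1
--     return lo
-- ===== Notes on version B (the rewrite author's own statement) =====
-- stated objective: alternative
-- what changed: B replaces A's single left-to-right scan with a maintained seen-dict by a binary search on the prefix length, probing whether s[:mid] is all-distinct via len(set(s[:mid])) == mid (the predicate is downward-closed, so bisection finds the maximal distinct prefix).
import Mathlib
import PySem

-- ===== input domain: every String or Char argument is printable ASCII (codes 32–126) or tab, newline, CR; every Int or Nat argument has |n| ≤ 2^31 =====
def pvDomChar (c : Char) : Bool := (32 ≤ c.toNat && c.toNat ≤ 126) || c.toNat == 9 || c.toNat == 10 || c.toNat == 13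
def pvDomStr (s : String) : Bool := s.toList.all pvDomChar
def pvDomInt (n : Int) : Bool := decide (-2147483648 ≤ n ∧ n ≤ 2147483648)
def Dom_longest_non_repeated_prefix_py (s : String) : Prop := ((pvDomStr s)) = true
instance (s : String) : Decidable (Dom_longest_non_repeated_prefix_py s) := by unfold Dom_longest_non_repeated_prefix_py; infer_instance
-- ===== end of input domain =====

-- B replaces A's left-to-right scan with a seen-dict by a BINARY SEARCH on the prefix
-- length ("s[:k] all distinct" is downward-closed); alternative algorithm, not faster.

-- ===== PORT A =====
-- loop 'for char in s': returns some (len charset) at the first repeated char, none if the loop finishes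
def pvGoA (d : PySem.Dict Char Int) : List Char → Option Int
  | [] => none
  | c :: cs => if d.contains c = false then pvGoA (d.insert c 1) cs else some (d.size : Int)

def longest_non_repeated_prefix_py (s : String) : Int :=
  match pvGoA PySem.Dict.empty s.toList with
  | some n => n
  | none => (s.toList.length : Int)

-- ===== PORT B =====
-- 'while lo < hi: mid = (lo+hi+1)//2; if len(set(s[:mid])) == mid: lo = mid else: hi = mid-1'
-- lo, hi, mid stay nonnegative in Python, so they are carried as Nat: '(lo+hi+1)//2' is Nat
-- division (= Python floor division on nonnegatives) and s[:mid] is 'take mid' (mid ≥ 0).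
def pvBS (l : List Char) (lo hi : Nat) : Nat :=
  if _h : lo < hi then
    let mid := (lo + hi + 1) / 2
    if (PySem.Set.ofList (l.take mid)).length = mid then pvBS l mid hi
    else pvBS l lo (mid - 1)
  else lo
  termination_by hi - lo
  decreasing_by all_goals omega

def longest_non_repeated_prefix_py_alt (s : String) : Int :=
  ((pvBS s.toList 0 s.toList.length : Nat) : Int)

-- ===== PRECONDITION & SPEC =====
def Spec_longest_non_repeated_prefix_py (s : String) (out : Int) : Prop := out = longest_non_repeated_prefix_py_alt s
instance (s : String) (out : Int) : Decidable (Spec_longest_non_repeated_prefix_py s out) := by unfold Spec_longest_non_repeated_prefix_py; infer_instance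

-- ===== CLAIM (what is proved, stated in full; the proofs are below) =====
def Claim_equal_longest_non_repeated_prefix_py : Prop := ∀ (s : String), Dom_longest_non_repeated_prefix_py s → Spec_longest_non_repeated_prefix_py s (longest_non_repeated_prefix_py s)

-- ===== LEMMAS AND PROOFS =====

-- the common specification: r is "the longest all-distinct prefix length of l"
def pvIsAns (l : List Char) (r : Nat) : Prop :=
  (l.take r).Nodup ∧ (∀ k, k ≤ l.length → (l.take k).Nodup → k ≤ r) ∧ r ≤ l.length

theorem pvIsAns_unique {l : List Char} {r₁ r₂ : Nat}
    (h₁ : pvIsAns l r₁) (h₂ : pvIsAns l r₂) : r₁ = r₂ := by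
  obtain ⟨n₁, m₁, le₁⟩ := h₁
  obtain ⟨n₂, m₂, le₂⟩ := h₂
  exact Nat.le_antisymm (m₂ r₁ le₁ n₁) (m₁ r₂ le₂ n₂)

-- downward closure: a shorter prefix of an all-distinct prefix is all-distinct
theorem pvNodup_take_mono (l : List Char) {j k : Nat} (hjk : j ≤ k)
    (h : (l.take k).Nodup) : (l.take j).Nodup := by
  have : l.take j = (l.take k).take j := by
    rw [List.take_take]; congr 1; omega
  rw [this]
  exact h.sublist (List.take_sublist _ _)

-- set(xs) (first occurrences) is a sublist of xs
theorem pvOfList_sublist (xs : List Char) : (PySem.Set.ofList xs).Sublist xs := by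
  induction xs using List.reverseRecOn with
  | nil => simp [PySem.Set.ofList_nil]
  | append_singleton ys y ih =>
    rw [PySem.Set.ofList_append_singleton, PySem.Set.add_eq_ite]
    split
    · exact ih.trans (List.sublist_append_left ys [y])
    · exact ih.append_right [y]

-- the test the port makes: len(set(s[:mid])) == mid decides distinctness of the prefix
theorem pvTest_iff (l : List Char) {mid : Nat} (hm : mid ≤ l.length) :
    (PySem.Set.ofList (l.take mid)).length = mid ↔ (l.take mid).Nodup := by
  have hlen : (l.take mid).length = mid := by simp; omega
  constructor
  · intro h
    have := (pvOfList_sublist (l.take mid)).eq_of_length (by rw [h, hlen])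
    rw [← this]; exact PySem.Set.nodup_ofList _
  · intro h
    rw [PySem.Set.ofList_eq_self_of_nodup _ h, hlen]

-- binary-search invariant: from a bracket [lo, hi] with P lo and all good k ≤ hi,
-- pvBS returns the answer
theorem pvBS_spec (l : List Char) : ∀ (n lo hi : Nat), hi - lo = n →
    hi ≤ l.length → (l.take lo).Nodup →
    (∀ k, k ≤ l.length → (l.take k).Nodup → k ≤ hi) → lo ≤ hi →
    pvIsAns l (pvBS l lo hi) := by
  intro n
  induction n using Nat.strong_induction_on with
  | _ n ih =>
    intro lo hi hn hhi hlo hmax hlh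
    rw [pvBS]
    by_cases h : lo < hi
    · rw [dif_pos h]
      have hmid₁ : lo < (lo + hi + 1) / 2 := by omega
      have hmid₂ : (lo + hi + 1) / 2 ≤ hi := by omega
      by_cases ht : (PySem.Set.ofList (l.take ((lo + hi + 1) / 2))).length = (lo + hi + 1) / 2
      · simp only [ht, if_true]
        have hnd := (pvTest_iff l (by omega)).mp ht
        exact ih (hi - (lo + hi + 1) / 2) (by omega) _ _ rfl hhi hnd hmax (by omega)
      · simp only [ht, if_false]
        have hnd : ¬ (l.take ((lo + hi + 1) / 2)).Nodup :=
          fun hc => ht ((pvTest_iff l (by omega)).mpr hc)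
        have hmax' : ∀ k, k ≤ l.length → (l.take k).Nodup → k ≤ (lo + hi + 1) / 2 - 1 := by
          intro k hk hkn
          by_contra hgt
          exact hnd (pvNodup_take_mono l (by omega) hkn)
        exact ih ((lo + hi + 1) / 2 - 1 - lo) (by omega) _ _ rfl (by omega) hlo hmax' (by omega)
    · rw [dif_neg h]
      have : lo = hi := by omega
      subst this
      exact ⟨hlo, hmax, by omega⟩

-- reference form of A's scan: p = characters already seen, in order, all distinct
def pvRef : List Char → List Char → Nat
  | p, [] => p.length
  | p, c :: cs => if c ∈ p then p.length else pvRef (p ++ [c]) cs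

theorem pvRef_spec : ∀ (cs p : List Char), p.Nodup → pvIsAns (p ++ cs) (pvRef p cs) := by
  intro cs
  induction cs with
  | nil =>
    intro p hp
    refine ⟨by simpa [pvRef] using hp, fun k hk _ => by simpa [pvRef] using hk, by simp [pvRef]⟩
  | cons c cs ih =>
    intro p hp
    by_cases hmem : c ∈ p
    · refine ⟨?_, ?_, by simp [pvRef, hmem]⟩
      · simpa [pvRef, hmem, List.take_left] using hp
      · intro k hk hkn
        simp only [pvRef, hmem, if_true]
        by_contra hgt
        have hnd1 : ((p ++ c :: cs).take (p.length + 1)).Nodup :=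
          pvNodup_take_mono _ (by omega) hkn
        have : (p ++ c :: cs).take (p.length + 1) = p ++ [c] := by
          rw [List.take_append]
          simp
        rw [this] at hnd1
        have : c ∉ p := by
          intro hc
          exact (List.nodup_append.mp hnd1).2.2 c hc c (by simp) rfl
        exact this hmem
    · have h1 : (p ++ [c]).Nodup := by
        rw [List.nodup_append]
        exact ⟨hp, List.nodup_singleton c, fun a ha b hb => by simp at hb; exact fun h => hmem ((h.trans hb) ▸ ha)⟩
      have h2 := ih (p ++ [c]) h1
      have heq : (p ++ [c]) ++ cs = p ++ c :: cs := by simp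
      rw [heq] at h2
      simpa [pvRef, hmem] using h2

-- A's port computes pvRef of its remaining input
theorem pvGoA_ref (cs : List Char) : ∀ (d : PySem.Dict Char Int) (p : List Char),
    (∀ c, d.contains c = true ↔ c ∈ p) → d.size = p.length →
    (match pvGoA d cs with
      | some n => n
      | none => ((p.length + cs.length : Nat) : Int)) = (pvRef p cs : Int) := by
  induction cs with
  | nil => intro d p _ hs; simp [pvGoA, pvRef]
  | cons c cs ih =>
    intro d p hc hs
    by_cases hmem : c ∈ p
    · have : d.contains c = true := (hc c).mpr hmem
      simp [pvGoA, this, pvRef, hmem, hs]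
    · have hcf : d.contains c = false := by
        cases h : d.contains c with
        | true => exact absurd ((hc c).mp h) hmem
        | false => rfl
      have h1 : ∀ x, (d.insert c 1).contains x = true ↔ x ∈ p ++ [c] := by
        intro x
        rw [PySem.Dict.contains_insert]
        simp [hc x, or_comm]
      have h2 : (d.insert c 1).size = (p ++ [c]).length := by
        rw [PySem.Dict.size_insert]; simp [hcf, hs]
      have hstep := ih (d.insert c 1) (p ++ [c]) h1 h2
      have hlen : (p ++ [c]).length + cs.length = p.length + (c :: cs).length := by
        simp; omega
      rw [hlen] at hstep
      simpa [pvGoA, hcf, pvRef, hmem] using hstep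

-- ===== VERDICT (by name: the statement is the Claim_ definition above) =====
theorem longest_non_repeated_prefix_py_spec : Claim_equal_longest_non_repeated_prefix_py := by
  intro s _
  unfold Spec_longest_non_repeated_prefix_py longest_non_repeated_prefix_py longest_non_repeated_prefix_py_alt
  have hA := pvGoA_ref s.toList PySem.Dict.empty []
    (by intro c; simp [PySem.Dict.contains_empty]) (by simp [PySem.Dict.size_empty])
  simp only [List.length_nil, Nat.zero_add] at hA
  have hRef := pvRef_spec s.toList [] List.nodup_nil
  simp only [List.nil_append] at hRef
  have hBS := pvBS_spec s.toList (s.toList.length) 0 s.toList.length (by omega) (le_refl _)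
    (by simp) (fun k hk _ => hk) (Nat.zero_le _)
  rw [hA, pvIsAns_unique hRef hBS]
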